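-- pv_equiv track=rewrite | github.com/erdincuzun/ImageCrawler | regex_generator.py | csstoRegex
-- ===== SOURCE A (Python) =====
-- def csstoRegex(css_selector, result_type = 'innerHTML'):
--     pos_class = css_selector.find('.')
--     pos_id = css_selector.find('#')
--     pos_other_attributes = css_selector.find('[')
--
--     regex = ''
--     if pos_class != -1 or pos_id != -1 or pos_other_attributes != -1:
--         d = {'id': pos_class, 'class': pos_id, 'other': pos_other_attributes}
--         d = {key: d[key] for key in d if d[key]>0}
--         key_min = min(d.keys(), key=(lambda k: d[k]))
--         val = d[key_min]
--         tagname = css_selector[:val]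
--         regex = '<' + tagname + '\\s*'
--         while len(d)>0:
--             d.pop(key_min)
--             if len(d) > 0: #more than one attribute, the ordering of attributes is a crucial case for regex
--                 temp_key_min = min(d.keys(), key=(lambda k: d[k]))
--                 temp_val = d[temp_key_min]
--                 if key_min == 'id':
--                     regex += 'class=\\s*?[\'|"][\\sa-zA-Z0-9_]*?' + css_selector[val+1:temp_val].replace('.', '[\\sa-zA-Z0-9_]*?') + '[\\sa-zA-Z0-9_]*?[\'|"]\\s*?'
--                 elif key_min == 'class':
--                     regex += 'id=\\s*?[\'|"][\\sa-zA-Z0-9_]*?' + css_selector[val+1:temp_val].replace('.', '[\\sa-zA-Z0-9_]*?') + '[\\sa-zA-Z0-9_]*?[\'|"]\\s*?'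
--                 else:
--                     regex += css_selector[val+1:val+1+css_selector[val+1:].find(']')].replace('"', '\\s*?[\'|"]').replace('\'', '\\s*?[\'|"]')
--                 key_min = temp_key_min
--                 val = temp_val
--             else:
--                 if key_min == 'id':
--                     regex += 'class=\\s*?[\'|"][\\sa-zA-Z0-9_]*?' + css_selector[val+1:].replace('.', '[\\sa-zA-Z0-9_]*?') + '[\\sa-zA-Z0-9_]*?[\'|"]\\s*?'
--                 elif key_min == 'class':
--                     regex += 'id=\\s*?[\'|"][\\sa-zA-Z0-9_]*?' + css_selector[val+1:].replace('.', '[\\sa-zA-Z0-9_]*?') + '[\\sa-zA-Z0-9_]*?[\'|"]\\s*?'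
--                 else:
--                     regex += css_selector[val+1:val+1+css_selector[val+1:].find(']')].replace('"', '\\s*?[\'|"]').replace('\'', '\\s*?[\'|"]')
--
--         if result_type == 'outerHTML':
--             regex += '>.*?</' + tagname + '>'
--         elif result_type == 'HTMLtag':
--             regex += '>'
--         else:
--             regex += '>(.*?)</' + tagname + '>'
--     else: #means css_selector only contains tag name
--         if result_type == 'outerHTML':
--             regex = '<' + css_selector + '>.*?</' + css_selector + '>'
--         elif result_type == 'HTMLtag':
--             regex = '<' + css_selector + '>'
--         else:
--             regex = '<' + css_selector + '>(.*?)</' + css_selector + '>'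
--
--     return regex
-- ===== SOURCE B (Python) =====
-- def csstoRegex(css_selector, result_type='innerHTML'):
--     positions = [('id', css_selector.find('.')),
--                  ('class', css_selector.find('#')),
--                  ('other', css_selector.find('['))]
--     items = sorted([(p, k) for k, p in positions if p > 0], key=lambda t: t[0])
--     if items:
--         tagname = css_selector[:items[0][0]]
--         parts = ['<' + tagname + '\\s*']
--         for i, (val, key) in enumerate(items):
--             if key == 'other':
--                 seg = css_selector[val + 1: val + 1 + css_selector[val + 1:].find(']')]
--                 parts.append(seg.replace('"', '\\s*?[\'|"]').replace("'", '\\s*?[\'|"]'))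
--             else:
--                 end = items[i + 1][0] if i + 1 < len(items) else len(css_selector)
--                 attr = 'class' if key == 'id' else 'id'
--                 mid = css_selector[val + 1:end].replace('.', '[\\sa-zA-Z0-9_]*?')
--                 parts.append(attr + '=\\s*?[\'|"][\\sa-zA-Z0-9_]*?' + mid + '[\\sa-zA-Z0-9_]*?[\'|"]\\s*?')
--         body = ''.join(parts)
--     else:
--         tagname = css_selector
--         body = '<' + css_selector
--     if result_type == 'outerHTML':
--         return body + '>.*?</' + tagname + '>'
--     elif result_type == 'HTMLtag':
--         return body + '>'
--     else:
--         return body + '>(.*?)</' + tagname + '>'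
-- ===== Notes on version B (the rewrite author's own statement) =====
-- stated objective: simpler
-- what changed: B replaces A's dict plus repeated min()/pop() while-loop (recomputing the minimum each round) by one stable sort of the (position, kind) marker pairs followed by a single lookahead pass that joins the fragments.
-- outside the precondition, e.g. on csstoRegex('.', 'innerHTML'): A raises ValueError, B returns '<.>(.*?)</.>'; on csstoRegex('.a', 'innerHTML'): A raises ValueError, B returns '<.a>(.*?)</.a>'; on csstoRegex('#', 'innerHTML'): A raises ValueError, B returns '<#>(.*?)</#>'
import Mathlib
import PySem

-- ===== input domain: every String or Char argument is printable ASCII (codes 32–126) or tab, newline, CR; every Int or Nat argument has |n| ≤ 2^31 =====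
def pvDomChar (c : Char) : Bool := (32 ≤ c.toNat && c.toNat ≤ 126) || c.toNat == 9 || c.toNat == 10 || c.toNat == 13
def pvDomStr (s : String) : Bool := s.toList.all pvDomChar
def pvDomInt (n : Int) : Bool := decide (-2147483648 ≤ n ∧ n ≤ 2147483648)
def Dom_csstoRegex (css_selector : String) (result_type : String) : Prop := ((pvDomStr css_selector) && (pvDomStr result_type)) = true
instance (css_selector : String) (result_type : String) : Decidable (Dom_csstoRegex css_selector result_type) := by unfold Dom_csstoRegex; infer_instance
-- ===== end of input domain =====

-- B replaces A's dict + repeated min()/pop() while-loop by one stable sort of the (position, kind)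
-- markers followed by a single lookahead pass (objective: simpler).

-- ===== PORT A =====
-- the while loop of A: pops the current minimum key, emits its fragment, recomputes the min
def pvLoopA (css : String) : Nat → PySem.Dict String Int → String → Int → String → String
  | 0, _, _, _, regex => regex
  | fuel+1, d, key_min, val, regex =>
    if d.size > 0 then
      let d := d.erase key_min
      if d.size > 0 then
        let temp_key_min := (PySem.List.min? d.keys (fun k => d.getD k 0)).getD ""
        let temp_val := d.getD temp_key_min 0
        let regex :=
          if key_min == "id" then
            regex ++ "class=\\s*?['|\"][\\sa-zA-Z0-9_]*?" ++ PySem.Str.replace (PySem.Str.slice css (some (val+1)) (some temp_val)) "." "[\\sa-zA-Z0-9_]*?" ++ "[\\sa-zA-Z0-9_]*?['|\"]\\s*?"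
          else if key_min == "class" then
            regex ++ "id=\\s*?['|\"][\\sa-zA-Z0-9_]*?" ++ PySem.Str.replace (PySem.Str.slice css (some (val+1)) (some temp_val)) "." "[\\sa-zA-Z0-9_]*?" ++ "[\\sa-zA-Z0-9_]*?['|\"]\\s*?"
          else
            regex ++ PySem.Str.replace (PySem.Str.replace (PySem.Str.slice css (some (val+1)) (some (val+1+ PySem.Str.find (PySem.Str.slice css (some (val+1)) none) "]"))) "\"" "\\s*?['|\"]") "'" "\\s*?['|\"]"
        pvLoopA css fuel d temp_key_min temp_val regex
      else
        let regex :=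
          if key_min == "id" then
            regex ++ "class=\\s*?['|\"][\\sa-zA-Z0-9_]*?" ++ PySem.Str.replace (PySem.Str.slice css (some (val+1)) none) "." "[\\sa-zA-Z0-9_]*?" ++ "[\\sa-zA-Z0-9_]*?['|\"]\\s*?"
          else if key_min == "class" then
            regex ++ "id=\\s*?['|\"][\\sa-zA-Z0-9_]*?" ++ PySem.Str.replace (PySem.Str.slice css (some (val+1)) none) "." "[\\sa-zA-Z0-9_]*?" ++ "[\\sa-zA-Z0-9_]*?['|\"]\\s*?"
          else
            regex ++ PySem.Str.replace (PySem.Str.replace (PySem.Str.slice css (some (val+1)) (some (val+1+ PySem.Str.find (PySem.Str.slice css (some (val+1)) none) "]"))) "\"" "\\s*?['|\"]") "'" "\\s*?['|\"]"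
        pvLoopA css fuel d key_min val regex
    else regex

def csstoRegex (css_selector : String) (result_type : String) : String :=
  let pos_class := PySem.Str.find css_selector "."
  let pos_id := PySem.Str.find css_selector "#"
  let pos_other_attributes := PySem.Str.find css_selector "["
  if pos_class ≠ -1 ∨ pos_id ≠ -1 ∨ pos_other_attributes ≠ -1 then
    let d : PySem.Dict String Int := PySem.Dict.ofList [("id", pos_class), ("class", pos_id), ("other", pos_other_attributes)]
    let d : PySem.Dict String Int := PySem.Dict.ofList (d.items.filter (fun kv => decide (kv.2 > 0)))
    let key_min := (PySem.List.min? d.keys (fun k => d.getD k 0)).getD ""   -- min() raises on an empty dict: excluded by Pre_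
    let val := d.getD key_min 0
    let tagname := PySem.Str.slice css_selector none (some val)
    let regex := "<" ++ tagname ++ "\\s*"
    let regex := pvLoopA css_selector d.size d key_min val regex
    if result_type == "outerHTML" then regex ++ ">.*?</" ++ tagname ++ ">"
    else if result_type == "HTMLtag" then regex ++ ">"
    else regex ++ ">(.*?)</" ++ tagname ++ ">"
  else
    if result_type == "outerHTML" then "<" ++ css_selector ++ ">.*?</" ++ css_selector ++ ">"
    else if result_type == "HTMLtag" then "<" ++ css_selector ++ ">"
    else "<" ++ css_selector ++ ">(.*?)</" ++ css_selector ++ ">"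

-- ===== PORT B =====
-- B's single pass over the sorted (position, kind) list; the head of `rest` is items[i+1]
def pvLoopB (css : String) : List (Int × String) → List String
  | [] => []
  | (val, key) :: rest =>
    (if key == "other" then
      PySem.Str.replace (PySem.Str.replace (PySem.Str.slice css (some (val+1)) (some (val+1+ PySem.Str.find (PySem.Str.slice css (some (val+1)) none) "]"))) "\"" "\\s*?['|\"]") "'" "\\s*?['|\"]"
     else
      let mid :=
        match rest with
        | (v2, _) :: _ => PySem.Str.slice css (some (val+1)) (some v2)
        | [] => PySem.Str.slice css (some (val+1)) none
      (if key == "id" then "class" else "id") ++ "=\\s*?['|\"][\\sa-zA-Z0-9_]*?" ++ PySem.Str.replace mid "." "[\\sa-zA-Z0-9_]*?" ++ "[\\sa-zA-Z0-9_]*?['|\"]\\s*?")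
    :: pvLoopB css rest

def csstoRegex_alt (css_selector : String) (result_type : String) : String :=
  let positions : List (String × Int) :=
    [("id", PySem.Str.find css_selector "."),
     ("class", PySem.Str.find css_selector "#"),
     ("other", PySem.Str.find css_selector "[")]
  let items := PySem.List.sorted ((positions.filter (fun kp => decide (kp.2 > 0))).map (fun kp => (kp.2, kp.1))) (fun t => t.1) false
  let tb : String × String :=
    match items with
    | (v0, _) :: _ =>
      let tagname := PySem.Str.slice css_selector none (some v0)
      (tagname, PySem.Str.join "" (("<" ++ tagname ++ "\\s*") :: pvLoopB css_selector items))
    | [] => (css_selector, "<" ++ css_selector)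
  if result_type == "outerHTML" then tb.2 ++ ">.*?</" ++ tb.1 ++ ">"
  else if result_type == "HTMLtag" then tb.2 ++ ">"
  else tb.2 ++ ">(.*?)</" ++ tb.1 ++ ">"

-- ===== PRECONDITION & SPEC =====
-- Pre_ excludes the inputs where some marker char '.', '#', '[' occurs in css_selector but none at a
-- position > 0: there A's min() over the emptied dict raises ValueError (A returns on all other inputs).
def Pre_csstoRegex (css_selector : String) (result_type : String) : Prop :=
  (PySem.Str.find css_selector "." = -1 ∧ PySem.Str.find css_selector "#" = -1 ∧ PySem.Str.find css_selector "[" = -1)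
  ∨ (0 < PySem.Str.find css_selector "." ∨ 0 < PySem.Str.find css_selector "#" ∨ 0 < PySem.Str.find css_selector "[")
instance (css_selector : String) (result_type : String) : Decidable (Pre_csstoRegex css_selector result_type) := by unfold Pre_csstoRegex; infer_instance
def pvWitness_csstoRegex : String × String := ("div.content", "innerHTML")

def Spec_csstoRegex (css_selector : String) (result_type : String) (out : String) : Prop := out = csstoRegex_alt css_selector result_type
instance (css_selector : String) (result_type : String) (out : String) : Decidable (Spec_csstoRegex css_selector result_type out) := by unfold Spec_csstoRegex; infer_instance

-- ===== CLAIM (what is proved, stated in full; the proofs are below) =====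
def Claim_equal_csstoRegex : Prop := ∀ (css_selector : String) (result_type : String), Dom_csstoRegex css_selector result_type → Pre_csstoRegex css_selector result_type → Spec_csstoRegex css_selector result_type (csstoRegex css_selector result_type)
-- ===== LEMMAS AND PROOFS =====

theorem pvJoinNilCons (a : String) (l : List String) :
    PySem.Str.join "" (a :: l) = a ++ PySem.Str.join "" l := by
  rw [← String.toList_inj]
  simp [PySem.Str.join, PySem.Chars.join, List.intercalate, String.toList_append]
  cases l <;> simp

theorem pvMain (css rt : String) (hpre : Pre_csstoRegex css rt) : csstoRegex css rt = csstoRegex_alt css rt := by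
  unfold Pre_csstoRegex at hpre
  unfold csstoRegex csstoRegex_alt
  generalize hc : PySem.Str.find css "." = pc at *
  generalize hi : PySem.Str.find css "#" = pi at *
  generalize ho : PySem.Str.find css "[" = po at *
  by_cases h1 : 0 < pc <;> by_cases h2 : 0 < pi <;> by_cases h3 : 0 < po
  · have hne : pc ≠ (-1:Int) := by omega
    by_cases hip : pi < pc <;> by_cases hoi : po < pi <;> by_cases hoc : po < pc <;>
    simp [h1, h2, h3, hne, hip, hoi, hoc, PySem.List.min?, PySem.List.sorted, PySem.List.insertBy, PySem.Dict.keys,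
      PySem.Dict.getD, PySem.Dict.get?, PySem.Dict.size, PySem.Dict.erase,
      PySem.Dict.ofList, PySem.Dict.update, PySem.Dict.empty, PySem.Dict.insert, PySem.Dict.contains,
      pvLoopA, pvLoopB, List.filter,
      pvJoinNilCons, String.append_assoc] <;>
      (try split_ifs) <;> (try (rw [← String.toList_inj]; simp [String.toList_append]))
  · have hne : pc ≠ (-1:Int) := by omega
    by_cases hip : pi < pc <;>
    simp [h1, h2, h3, hne, hip, PySem.List.min?, PySem.List.sorted, PySem.List.insertBy, PySem.Dict.keys,
      PySem.Dict.getD, PySem.Dict.get?, PySem.Dict.size, PySem.Dict.erase,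
      PySem.Dict.ofList, PySem.Dict.update, PySem.Dict.empty, PySem.Dict.insert, PySem.Dict.contains,
      pvLoopA, pvLoopB, List.filter,
      pvJoinNilCons, String.append_assoc] <;>
      (try split_ifs) <;> (try (rw [← String.toList_inj]; simp [String.toList_append]))
  · have hne : pc ≠ (-1:Int) := by omega
    by_cases hoc : po < pc <;>
    simp [h1, h2, h3, hne, hoc, PySem.List.min?, PySem.List.sorted, PySem.List.insertBy, PySem.Dict.keys,
      PySem.Dict.getD, PySem.Dict.get?, PySem.Dict.size, PySem.Dict.erase,
      PySem.Dict.ofList, PySem.Dict.update, PySem.Dict.empty, PySem.Dict.insert, PySem.Dict.contains,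
      pvLoopA, pvLoopB, List.filter,
      pvJoinNilCons, String.append_assoc] <;>
      (try split_ifs) <;> (try (rw [← String.toList_inj]; simp [String.toList_append]))
  · have hne : pc ≠ (-1:Int) := by omega
    simp [h1, h2, h3, hne, PySem.List.min?, PySem.List.sorted, PySem.List.insertBy, PySem.Dict.keys,
      PySem.Dict.getD, PySem.Dict.get?, PySem.Dict.size, PySem.Dict.erase,
      PySem.Dict.ofList, PySem.Dict.update, PySem.Dict.empty, PySem.Dict.insert, PySem.Dict.contains,
      pvLoopA, pvLoopB, List.filter,
      pvJoinNilCons, String.append_assoc]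
    all_goals split_ifs <;> (rw [← String.toList_inj]; simp [String.toList_append])
  · have hne : pi ≠ (-1:Int) := by omega
    by_cases hoi : po < pi <;>
    simp [h1, h2, h3, hne, hoi, PySem.List.min?, PySem.List.sorted, PySem.List.insertBy, PySem.Dict.keys,
      PySem.Dict.getD, PySem.Dict.get?, PySem.Dict.size, PySem.Dict.erase,
      PySem.Dict.ofList, PySem.Dict.update, PySem.Dict.empty, PySem.Dict.insert, PySem.Dict.contains,
      pvLoopA, pvLoopB, List.filter,
      pvJoinNilCons, String.append_assoc] <;>
      (try split_ifs) <;> (try (rw [← String.toList_inj]; simp [String.toList_append]))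
  · have hne : pi ≠ (-1:Int) := by omega
    simp [h1, h2, h3, hne, PySem.List.min?, PySem.List.sorted, PySem.List.insertBy, PySem.Dict.keys,
      PySem.Dict.getD, PySem.Dict.get?, PySem.Dict.size, PySem.Dict.erase,
      PySem.Dict.ofList, PySem.Dict.update, PySem.Dict.empty, PySem.Dict.insert, PySem.Dict.contains,
      pvLoopA, pvLoopB, List.filter,
      pvJoinNilCons, String.append_assoc]
    all_goals split_ifs <;> (rw [← String.toList_inj]; simp [String.toList_append])
  · have hne : po ≠ (-1:Int) := by omega
    simp [h1, h2, h3, hne, PySem.List.min?, PySem.List.sorted, PySem.List.insertBy, PySem.Dict.keys,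
      PySem.Dict.getD, PySem.Dict.get?, PySem.Dict.size, PySem.Dict.erase,
      PySem.Dict.ofList, PySem.Dict.update, PySem.Dict.empty, PySem.Dict.insert, PySem.Dict.contains,
      pvLoopA, pvLoopB, List.filter,
      pvJoinNilCons, String.append_assoc]
    all_goals split_ifs <;> (rw [← String.toList_inj]; simp [String.toList_append])
  · obtain ⟨e1,e2,e3⟩ : pc = -1 ∧ pi = -1 ∧ po = -1 := by
      rcases hpre with h | h
      · exact h
      · omega
    subst e1; subst e2; subst e3
    simp [PySem.List.sorted]

-- ===== VERDICT (by name: the statement is the Claim_ definition above) =====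
theorem csstoRegex_spec : Claim_equal_csstoRegex := by
  intro css rt _ hpre
  unfold Spec_csstoRegex
  exact pvMain css rt hpre
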